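-- pv_equiv track=rewrite | github.com/VictorKVS/mindforge-ai-telegram-bot | apps/metrics/decisions.py | decision_stats
-- ===== SOURCE A (Python) =====
-- def decision_stats(events):
--     allow = sum(1 for e in events if e["decision"] == "ALLOW")
--     deny = sum(1 for e in events if e["decision"] == "DENY")
--
--     return {
--         "allow": allow,
--         "deny": deny,
--         "total": allow + deny,
--     }
-- ===== SOURCE B (Python) =====
-- def decision_stats(events):
--     # Single pass with a pair accumulator driven by a delta table,
--     # instead of two staged filtering scans.
--     step = {"ALLOW": (1, 0), "DENY": (0, 1)}
--     allow = 0
--     deny = 0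
--     for e in events:
--         da, dd = step.get(e["decision"], (0, 0))
--         allow += da
--         deny += dd
--     return {"allow": allow, "deny": deny, "total": allow + deny}
-- ===== Notes on version B (the rewrite author's own statement) =====
-- stated objective: alternative
-- what changed: Replaces A's two staged generator-sum scans with one explicit loop carrying an (allow, deny) pair accumulator updated by a delta table keyed on the decision value.
import Mathlib
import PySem

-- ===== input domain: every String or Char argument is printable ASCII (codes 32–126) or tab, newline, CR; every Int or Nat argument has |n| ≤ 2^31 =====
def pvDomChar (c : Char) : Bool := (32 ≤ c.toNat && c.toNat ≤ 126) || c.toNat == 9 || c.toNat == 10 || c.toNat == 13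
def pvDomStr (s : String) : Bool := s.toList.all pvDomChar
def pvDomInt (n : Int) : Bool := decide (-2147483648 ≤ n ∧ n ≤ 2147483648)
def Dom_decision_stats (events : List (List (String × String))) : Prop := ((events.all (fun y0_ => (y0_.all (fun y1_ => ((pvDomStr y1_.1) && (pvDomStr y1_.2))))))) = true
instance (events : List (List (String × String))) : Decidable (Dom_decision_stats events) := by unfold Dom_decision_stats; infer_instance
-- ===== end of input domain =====

-- B makes one explicit pass carrying an (allow, deny) pair accumulator updated via a
-- delta table, instead of A's two staged filtering scans (alternative decomposition).

-- ===== PORT A =====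
-- e["decision"]: first-match lookup in the association list (Python dict access)
def pvDecision (e : List (String × String)) : Option String := e.lookup "decision"

-- allow = sum(1 for e in events if e["decision"] == "ALLOW")
def pvSumIf (events : List (List (String × String))) (v : String) : Int :=
  events.foldl (fun acc e => if pvDecision e = some v then acc + 1 else acc) 0

def decision_stats (events : List (List (String × String))) : List (String × Int) :=
  let allow := pvSumIf events "ALLOW"
  let deny := pvSumIf events "DENY"
  [("allow", allow), ("deny", deny), ("total", allow + deny)]

-- ===== PORT B =====
-- step = {"ALLOW": (1, 0), "DENY": (0, 1)}
def pvStepTable : PySem.Dict String (Int × Int) :=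
  PySem.Dict.mk [("ALLOW", (1, 0)), ("DENY", (0, 1))]

def decision_stats_alt (events : List (List (String × String))) : List (String × Int) :=
  let res := events.foldl
    (fun (ad : Int × Int) e =>
      let d := pvStepTable.getD ((pvDecision e).getD "") (0, 0)
      (ad.1 + d.1, ad.2 + d.2)) (0, 0)
  [("allow", res.1), ("deny", res.2), ("total", res.1 + res.2)]

-- ===== PRECONDITION & SPEC =====
-- Pre_ excludes events missing the "decision" key, on which Python A raises KeyError.
def Pre_decision_stats (events : List (List (String × String))) : Prop :=
  ∀ e ∈ events, (e.lookup "decision").isSome = true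
instance (events : List (List (String × String))) : Decidable (Pre_decision_stats events) := by
  unfold Pre_decision_stats; infer_instance

def pvWitness_decision_stats : (List (List (String × String))) :=
  [[("decision", "ALLOW")], [("decision", "DENY"), ("x", "y")], [("decision", "SKIP")]]

def Spec_decision_stats (events : List (List (String × String))) (out : List (String × Int)) : Prop := out = decision_stats_alt events
instance (events : List (List (String × String))) (out : List (String × Int)) : Decidable (Spec_decision_stats events out) := by unfold Spec_decision_stats; infer_instance

-- ===== CLAIM (what is proved, stated in full; the proofs are below) =====
def Claim_equal_decision_stats : Prop := ∀ (events : List (List (String × String))), Dom_decision_stats events → Pre_decision_stats events → Spec_decision_stats events (decision_stats events)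

-- ===== LEMMAS AND PROOFS =====

-- The delta looked up for a key, as an if-chain.
theorem pvStepTable_getD (k : String) :
    pvStepTable.getD k (0, 0)
      = if k = "ALLOW" then ((1 : Int), (0 : Int))
        else if k = "DENY" then (0, 1) else (0, 0) := by
  by_cases hA : k = "ALLOW"
  · subst hA; rfl
  · by_cases hD : k = "DENY"
    · subst hD; rfl
    · simp [pvStepTable, PySem.Dict.getD, PySem.Dict.get?_mk_cons, PySem.Dict.get?, hA, hD,
        Ne.symm hA, Ne.symm hD]

-- B's pair fold, with generalized accumulator, equals the two filtering sums.
theorem foldl_pair_eq (events : List (List (String × String))) (a d : Int) :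
    events.foldl
      (fun (ad : Int × Int) e =>
        let del := pvStepTable.getD ((pvDecision e).getD "") (0, 0)
        (ad.1 + del.1, ad.2 + del.2)) (a, d)
      = (events.foldl (fun acc e => if pvDecision e = some "ALLOW" then acc + 1 else acc) a,
         events.foldl (fun acc e => if pvDecision e = some "DENY" then acc + 1 else acc) d) := by
  induction events generalizing a d with
  | nil => rfl
  | cons e rest ih =>
    simp only [List.foldl_cons]
    rw [pvStepTable_getD]
    cases hdec : pvDecision e with
    | none => simp [ih]
    | some s =>
      by_cases hA : s = "ALLOW" <;> by_cases hD : s = "DENY" <;>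
        simp_all

theorem decision_stats_spec : Claim_equal_decision_stats := by
  intro events _ _
  unfold Spec_decision_stats decision_stats decision_stats_alt pvSumIf
  rw [foldl_pair_eq]
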